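-- pv_equiv track=rewrite | github.com/mautorresp/Teleport | debug_prediction.py | leb_len
-- ===== SOURCE A (Python) =====
-- def leb_len(n: int) -> int:
--     """LEB128 byte length"""
--     if n == 0:
--         return 1
--     length = 0
--     while n > 0:
--         length += 1
--         n >>= 7
--     return length
-- ===== SOURCE B (Python) =====
-- def leb_len(n: int) -> int:
--     """LEB128 byte length: closed-form count of 7-bit groups instead of a shift loop."""
--     if n <= 0:
--         return 1 if n == 0 else 0
--     return (n.bit_length() + 6) // 7
-- ===== Notes on version B (the rewrite author's own statement) =====
-- stated objective: simpler
-- what changed: Replaced the shift-and-count loop with a closed-form arithmetic count of seven-bit groups computed from bit_length, preserving A's behaviour at zero and on negative inputs.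
import Mathlib
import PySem

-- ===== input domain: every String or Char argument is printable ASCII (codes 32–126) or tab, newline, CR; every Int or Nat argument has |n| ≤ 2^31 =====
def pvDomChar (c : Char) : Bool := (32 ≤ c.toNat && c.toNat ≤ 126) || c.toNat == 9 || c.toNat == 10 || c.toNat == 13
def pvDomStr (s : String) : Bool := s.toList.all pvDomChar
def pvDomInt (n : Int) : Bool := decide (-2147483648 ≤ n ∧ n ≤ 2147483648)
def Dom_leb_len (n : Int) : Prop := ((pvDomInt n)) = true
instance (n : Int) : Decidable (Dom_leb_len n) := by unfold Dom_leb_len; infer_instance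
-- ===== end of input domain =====

-- B replaces A's shift-and-count loop by the closed-form group count (bit_length+6)//7 (objective: simpler).

-- ===== PORT A =====
-- the while loop; 'n >>= 7' is exactly 'n //= 128' on Python ints
def lebLoop (n length : Int) : Int :=
  if n > 0 then lebLoop (PySem.Int.floordiv n 128) (length + 1) else length
termination_by n.toNat
decreasing_by
  rename_i h
  rw [PySem.Int.floordiv_eq_ediv_of_pos (by omega : (0:Int) < 128)]
  omega

def leb_len (n : Int) : Int :=
  if n = 0 then 1 else lebLoop n 0

-- ===== PORT B =====
def leb_len_alt (n : Int) : Int :=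
  if n ≤ 0 then (if n = 0 then 1 else 0)
  else PySem.Int.floordiv ((PySem.Int.bitLength n : Int) + 6) 7

-- ===== PRECONDITION & SPEC =====
def Spec_leb_len (n : Int) (out : Int) : Prop := out = leb_len_alt n
instance (n : Int) (out : Int) : Decidable (Spec_leb_len n out) := by unfold Spec_leb_len; infer_instance

-- ===== CLAIM (what is proved, stated in full; the proofs are below) =====
def Claim_equal_leb_len : Prop := ∀ (n : Int), Dom_leb_len n → Spec_leb_len n (leb_len n)

-- ===== LEMMAS AND PROOFS =====

lemma lebLoop_nonpos (n length : Int) (h : ¬ n > 0) : lebLoop n length = length := by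
  rw [lebLoop]; simp [h]

lemma bitLength_div128 (m : Nat) (h : 128 ≤ m) :
    PySem.Int.bitLength (m : Int) = PySem.Int.bitLength (((m / 128 : Nat) : Int)) + 7 := by
  have h1 := PySem.Int.bitLength_natCast (m := m) (by omega)
  have h2 := PySem.Int.bitLength_natCast (m := m / 2) (by omega)
  have h3 := PySem.Int.bitLength_natCast (m := m / 4) (by omega)
  have h4 := PySem.Int.bitLength_natCast (m := m / 8) (by omega)
  have h5 := PySem.Int.bitLength_natCast (m := m / 16) (by omega)
  have h6 := PySem.Int.bitLength_natCast (m := m / 32) (by omega)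
  have h7 := PySem.Int.bitLength_natCast (m := m / 64) (by omega)
  have e2 : m / 2 / 2 = m / 4 := by omega
  have e3 : m / 4 / 2 = m / 8 := by omega
  have e4 : m / 8 / 2 = m / 16 := by omega
  have e5 : m / 16 / 2 = m / 32 := by omega
  have e6 : m / 32 / 2 = m / 64 := by omega
  have e7 : m / 64 / 2 = m / 128 := by omega
  rw [e2] at h2; rw [e3] at h3; rw [e4] at h4; rw [e5] at h5; rw [e6] at h6; rw [e7] at h7
  omega

lemma bitLength_pos_bounds (m : Nat) (h : 0 < m) :
    0 < PySem.Int.bitLength (m : Int) ∧ m < 2 ^ PySem.Int.bitLength (m : Int) ∧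
      2 ^ (PySem.Int.bitLength (m : Int) - 1) ≤ m := by
  have h1 := PySem.Int.lt_two_pow_bitLength (m : Int)
  have h2 := PySem.Int.two_pow_bitLength_le (m : Int) (Int.natCast_ne_zero.mpr (by omega))
  simp [Int.natAbs_natCast] at h1 h2
  refine ⟨?_, h1, h2⟩
  by_contra hz
  have : PySem.Int.bitLength (m : Int) = 0 := by omega
  rw [this] at h1; simp at h1; omega

lemma lebLoop_eq (m : Nat) : ∀ acc : Int, 0 < m →
    lebLoop (m : Int) acc = acc + PySem.Int.floordiv ((PySem.Int.bitLength (m : Int) : Int) + 6) 7 := by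
  induction m using Nat.strong_induction_on with
  | _ m ih =>
    intro acc hm
    rw [lebLoop]
    have hpos : ((m : Int) > 0) := by exact_mod_cast hm
    simp only [hpos, if_true]
    have hfd : PySem.Int.floordiv (m : Int) 128 = ((m / 128 : Nat) : Int) := by
      exact_mod_cast PySem.Int.floordiv_natCast m 128
    rw [hfd]
    obtain ⟨hbl, hub, hlb⟩ := bitLength_pos_bounds m hm
    by_cases hsmall : m < 128
    · have h0 : m / 128 = 0 := by omega
      rw [h0]
      simp only [Nat.cast_zero]
      rw [lebLoop_nonpos 0 (acc + 1) (by omega)]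
      have hble : PySem.Int.bitLength (m : Int) ≤ 7 := by
        by_contra hgt
        have : 2 ^ 7 ≤ 2 ^ (PySem.Int.bitLength (m : Int) - 1) := Nat.pow_le_pow_right (by omega) (by omega)
        omega
      rw [PySem.Int.floordiv_eq_ediv_of_pos (by omega : (0:Int) < 7)]
      omega
    · have hq : 0 < m / 128 := by omega
      rw [ih (m / 128) (by omega) (acc + 1) hq]
      rw [bitLength_div128 m (by omega)]
      rw [PySem.Int.floordiv_eq_ediv_of_pos (by omega : (0:Int) < 7),
          PySem.Int.floordiv_eq_ediv_of_pos (by omega : (0:Int) < 7)]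
      omega

-- ===== VERDICT (by name: the statement is the Claim_ definition above) =====
theorem leb_len_spec : Claim_equal_leb_len := by
  intro n _
  unfold Spec_leb_len leb_len leb_len_alt
  by_cases h0 : n = 0
  · simp [h0]
  · simp only [h0, if_false]
    by_cases hneg : n ≤ 0
    · rw [lebLoop_nonpos n 0 (by omega)]
      simp [hneg]
    · have hn : n = ((n.toNat : Nat) : Int) := by omega
      simp only [hneg, if_false]
      rw [hn, lebLoop_eq n.toNat 0 (by omega)]
      omega
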